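-- pv_equiv track=rewrite | github.com/taifu/aoc | 2020/16/day_16.py | parse
-- ===== SOURCE A (Python) =====
-- def parse(data):
--     step, rules = 0, {}
--     your_ticket, nearby_tickets = [], []
--     for line in data.strip().split('\n'):
--         if not line:
--             step += 1
--             continue
--         if step == 0:
--             parts = line.split(': ')
--             rules[parts[0]] = [int(p) for p in parts[1].replace(' or ', '-').split('-')]
--         elif line[0].isdigit():
--             values = [int(p) for p in line.split(',')]
--             if step == 1:
--                 your_ticket = values
--             else:
--                 nearby_tickets.append(values)
--     return rules, your_ticket, nearby_tickets
-- ===== SOURCE B (Python) =====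
-- def parse(data):
--     # Tag each non-blank line with the count of blank lines before it, then
--     # process the three categories in separate passes.
--     entries, blanks = [], 0
--     for line in data.strip().split('\n'):
--         if line:
--             entries.append((blanks, line))
--         else:
--             blanks += 1
--     rule_lines = [ln for st, ln in entries if st == 0]
--     ticket_lines = [ln for st, ln in entries if st == 1 and ln[0].isdigit()]
--     nearby_lines = [ln for st, ln in entries if st >= 2 and ln[0].isdigit()]
--     rules = {}
--     for ln in rule_lines:
--         parts = ln.split(': ')
--         rules[parts[0]] = [int(p) for p in parts[1].replace(' or ', '-').split('-')]
--     your_ticket = [int(p) for p in ticket_lines[-1].split(',')] if ticket_lines else []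
--     nearby_tickets = [[int(p) for p in ln.split(',')] for ln in nearby_lines]
--     return rules, your_ticket, nearby_tickets
-- ===== Notes on version B (the rewrite author's own statement) =====
-- stated objective: alternative
-- what changed: B replaces A's single stateful loop (a step counter mutated while dispatching each line) by a two-phase decomposition: first tag every non-blank line with the number of blank lines before it, then build the rules dict, your_ticket (last digit-starting line of section 1) and nearby_tickets in separate passes over the tagged lines.
import Mathlib
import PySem

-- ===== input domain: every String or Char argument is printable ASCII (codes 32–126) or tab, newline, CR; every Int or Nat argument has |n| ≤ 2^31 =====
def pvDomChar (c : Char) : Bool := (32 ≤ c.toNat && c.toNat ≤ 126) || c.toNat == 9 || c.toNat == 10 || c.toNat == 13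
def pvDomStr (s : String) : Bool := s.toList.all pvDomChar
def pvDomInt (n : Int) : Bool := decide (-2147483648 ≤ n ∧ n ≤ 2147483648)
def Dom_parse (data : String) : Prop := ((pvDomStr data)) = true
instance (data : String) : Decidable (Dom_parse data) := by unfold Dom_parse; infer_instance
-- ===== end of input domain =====

-- B tags each non-blank line with the number of blank lines before it, then handles the three
-- line categories (rules / your ticket / nearby tickets) in separate passes, instead of A's
-- single stateful loop; objective: alternative decomposition, same cost.

-- shared parsing helpers: these expressions occur verbatim in both Python versions
-- [int(p) for p in ln.split(',')]  (getD 0 is never reached inside Pre_parse)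
def pvNums (ln : String) : List Int :=
  ((PySem.Str.split? ln ",").getD []).map (fun p => (PySem.Int.ofStr? p).getD 0)

-- ln.split(': ')[0]
def pvRuleKey (ln : String) : String :=
  (PySem.List.pyGet? ((PySem.Str.split? ln ": ").getD []) 0).getD ""

-- [int(p) for p in ln.split(': ')[1].replace(' or ', '-').split('-')]
def pvRuleVals (ln : String) : List Int :=
  ((PySem.Str.split? (PySem.Str.replace
      ((PySem.List.pyGet? ((PySem.Str.split? ln ": ").getD []) 1).getD "") " or " "-") "-").getD
    []).map (fun p => (PySem.Int.ofStr? p).getD 0)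

-- ln[0].isdigit() for a non-empty line (false for empty, unreachable for non-blank lines)
def pvHeadDigit (ln : String) : Bool :=
  match PySem.Str.pyGet? ln 0 with
  | some c => PySem.Chars.isdigit c
  | none => false

-- ===== PORT A =====
-- the body of A's for-loop, on state (step, rules, your_ticket, nearby_tickets)
def pvStepA (acc : Int × PySem.Dict String (List Int) × List Int × List (List Int))
    (line : String) : Int × PySem.Dict String (List Int) × List Int × List (List Int) :=
  if line = "" then (acc.1 + 1, acc.2)
  else if acc.1 = 0 then
    (acc.1, acc.2.1.insert (pvRuleKey line) (pvRuleVals line), acc.2.2)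
  else if pvHeadDigit line then
    if acc.1 = 1 then (acc.1, acc.2.1, pvNums line, acc.2.2.2)
    else (acc.1, acc.2.1, acc.2.2.1, acc.2.2.2 ++ [pvNums line])
  else acc

def parse (data : String) : (List (String × List Int)) × List Int × List (List Int) :=
  let lines := (PySem.Str.split? (PySem.Str.strip data) "\n").getD []
  let fin := lines.foldl pvStepA (0, PySem.Dict.empty, [], [])
  (fin.2.1.items, fin.2.2.1, fin.2.2.2)

-- ===== PORT B =====
-- the body of B's tagging loop, on state (entries, blanks)
def pvStepB (acc : List (Int × String) × Int) (line : String) : List (Int × String) × Int :=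
  if line = "" then (acc.1, acc.2 + 1) else (acc.1 ++ [(acc.2, line)], acc.2)

def parse_alt (data : String) : (List (String × List Int)) × List Int × List (List Int) :=
  let lines := (PySem.Str.split? (PySem.Str.strip data) "\n").getD []
  let tagged := (lines.foldl pvStepB ([], 0)).1
  let ruleLines := (tagged.filter (fun e => e.1 == 0)).map (·.2)
  let ticketLines := (tagged.filter (fun e => e.1 == 1 && pvHeadDigit e.2)).map (·.2)
  let nearbyLines := (tagged.filter (fun e => decide (2 ≤ e.1) && pvHeadDigit e.2)).map (·.2)
  let rules := ruleLines.foldl (fun d ln => d.insert (pvRuleKey ln) (pvRuleVals ln))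
    (PySem.Dict.empty : PySem.Dict String (List Int))
  let yourTicket := match ticketLines.getLast? with
    | some ln => pvNums ln
    | none => ([] : List Int)
  (rules.items, yourTicket, nearbyLines.map pvNums)

-- ===== PRECONDITION & SPEC =====
-- the whitespace removal A applies first, written charwise (= Python's, which drops
-- exactly the isspace characters at both ends)
def pvWsTrim (data : String) : String :=
  String.mk
    (((data.toList.dropWhile PySem.Chars.isspace).reverse.dropWhile
        PySem.Chars.isspace).reverse)

-- tags each non-blank line of the input with the number of blank lines preceding it
def pvTag (s : Int) : List String → List (Int × String)
  | [] => []
  | l :: t => if l = "" then pvTag (s + 1) t else (s, l) :: pvTag s t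

-- a rules line must have a ': ' and integer bounds; a digit-starting ticket line must be
-- comma-separated integers — exactly the inputs on which Python A raises no ValueError/IndexError
def pvLineOK (st : Int) (ln : String) : Bool :=
  if st == 0 then
    decide (2 ≤ ((PySem.Str.split? ln ": ").getD []).length) &&
      ((PySem.Str.split? (PySem.Str.replace
          ((PySem.List.pyGet? ((PySem.Str.split? ln ": ").getD []) 1).getD "") " or " "-")
          "-").getD []).all (fun p => (PySem.Int.ofStr? p).isSome)
  else if pvHeadDigit ln then
    ((PySem.Str.split? ln ",").getD []).all (fun p => (PySem.Int.ofStr? p).isSome)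
  else true

-- Pre_parse holds exactly where Python A returns (outside it A raises ValueError or IndexError)
def Pre_parse (data : String) : Prop :=
  ((pvTag 0 ((PySem.Str.split? (pvWsTrim data) "\n").getD [])).all
    (fun e => pvLineOK e.1 e.2)) = true

instance (data : String) : Decidable (Pre_parse data) := by unfold Pre_parse; infer_instance

def pvWitness_parse : String := "a: 1-3\n\n7\n\n8"

def Spec_parse (data : String) (out : (List (String × List Int)) × List Int × List (List Int)) : Prop := out = parse_alt data
instance (data : String) (out : (List (String × List Int)) × List Int × List (List Int)) : Decidable (Spec_parse data out) := by unfold Spec_parse; infer_instance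

-- ===== CLAIM (what is proved, stated in full; the proofs are below) =====
def Claim_equal_parse : Prop := ∀ (data : String), Dom_parse data → Pre_parse data → Spec_parse data (parse data)

-- ===== LEMMAS AND PROOFS =====
-- final value of the step counter (only needed to state the fold invariant)
def pvStepF (s : Int) : List String → Int
  | [] => s
  | l :: t => pvStepF (if l = "" then s + 1 else s) t

theorem pvStepB_fold (lines : List String) :
    ∀ (acc : List (Int × String)) (s : Int),
      lines.foldl pvStepB (acc, s) = (acc ++ pvTag s lines, pvStepF s lines) := by
  induction lines with
  | nil => intro acc s; simp [pvTag, pvStepF]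
  | cons l t ih =>
    intro acc s
    by_cases h : l = "" <;>
      simp [pvStepB, pvTag, pvStepF, h, List.foldl_cons, ih, List.append_assoc]

theorem pvStepA_fold (lines : List String) :
    ∀ (step : Int), 0 ≤ step →
      ∀ (d : PySem.Dict String (List Int)) (yt : List Int) (nb : List (List Int)),
      lines.foldl pvStepA (step, d, yt, nb) =
        (pvStepF step lines,
         (((pvTag step lines).filter (fun e => e.1 == 0)).map (·.2)).foldl
           (fun d ln => d.insert (pvRuleKey ln) (pvRuleVals ln)) d,
         (match (((pvTag step lines).filter
             (fun e => e.1 == 1 && pvHeadDigit e.2)).map (·.2)).getLast? with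
          | some ln => pvNums ln
          | none => yt),
         nb ++ (((pvTag step lines).filter
           (fun e => decide (2 ≤ e.1) && pvHeadDigit e.2)).map (·.2)).map pvNums) := by
  induction lines with
  | nil => intro step _ d yt nb; simp [pvTag, pvStepF]
  | cons l t ih =>
    intro step hstep d yt nb
    rw [List.foldl_cons]
    by_cases hblank : l = ""
    · rw [show pvStepA (step, d, yt, nb) l = (step + 1, d, yt, nb) from by
        simp [pvStepA, hblank]]
      rw [ih (step + 1) (by omega) d yt nb]
      simp only [pvTag, pvStepF, hblank, reduceIte]
    · have htag : pvTag step (l :: t) = (step, l) :: pvTag step t := by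
        simp [pvTag, hblank]
      have hstf : pvStepF step (l :: t) = pvStepF step t := by
        simp [pvStepF, hblank]
      rw [htag, hstf]
      by_cases h0 : step = 0
      · subst h0
        rw [show pvStepA (0, d, yt, nb) l
              = (0, d.insert (pvRuleKey l) (pvRuleVals l), yt, nb) from by
          simp [pvStepA, hblank]]
        rw [ih 0 le_rfl (d.insert (pvRuleKey l) (pvRuleVals l)) yt nb]
        simp only [Prod.mk.injEq]
        exact ⟨by trivial, by simp, by simp, by simp⟩
      · by_cases hd : pvHeadDigit l
        · by_cases h1 : step = 1
          · subst h1
            rw [show pvStepA (1, d, yt, nb) l = (1, d, pvNums l, nb) from by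
              simp [pvStepA, hblank, hd]]
            rw [ih 1 (by omega) d (pvNums l) nb]
            simp only [Prod.mk.injEq]
            refine ⟨by trivial, by simp, ?_, by simp⟩
            rw [List.filter_cons]
            simp only [show ((1 : Int) == 1 && pvHeadDigit l) = true from by simp [hd],
              reduceIte, List.map_cons]
            cases hg : (((pvTag 1 t).filter
                (fun e => e.1 == 1 && pvHeadDigit e.2)).map (·.2)).getLast? with
            | none =>
              rw [List.getLast?_eq_none_iff.mp hg]
              simp
            | some ln =>
              obtain ⟨pre, hpre⟩ := List.getLast?_eq_some_iff.mp hg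
              rw [hpre, ← List.cons_append, List.getLast?_concat]
          · have h2 : (2 : Int) ≤ step := by omega
            rw [show pvStepA (step, d, yt, nb) l
                  = (step, d, yt, nb ++ [pvNums l]) from by
              simp [pvStepA, hblank, hd, h0, h1]]
            rw [ih step hstep d yt (nb ++ [pvNums l])]
            simp only [Prod.mk.injEq]
            refine ⟨by trivial, by simp [h0], by simp [h1], ?_⟩
            simp [show ((2:Int) ≤ step) from h2, hd, List.append_assoc]
        · rw [show pvStepA (step, d, yt, nb) l = (step, d, yt, nb) from by
            simp [pvStepA, hblank, h0, hd]]
          rw [ih step hstep d yt nb]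
          simp only [Prod.mk.injEq]
          exact ⟨by trivial, by simp [h0], by simp [hd], by simp [hd]⟩

-- ===== VERDICT (by name: the statement is the Claim_ definition above) =====
theorem parse_spec : Claim_equal_parse := by
  unfold Claim_equal_parse
  intro data _ _
  unfold Spec_parse
  simp only [parse, parse_alt]
  rw [pvStepB_fold, pvStepA_fold _ 0 le_rfl]
  simp
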